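-- pv_equiv track=rewrite | github.com/zardoru/osutk | tools/chart_to_sb.py | _generate_accom_scroll
-- ===== SOURCE A (Python) =====
-- def _generate_accom_scroll(sv):
--     if len(sv) > 0:
--         ret = [(sv[0][0], 0)]
--     else:
--         ret = [(0, 0)]
--
--     for i, (t, _) in enumerate(sv[1:]):
--         # add integral from previous time to current time
--         integral = (t - ret[i][0]) * sv[i][1] + ret[i][1]
--         ret.append((t, integral))
--
--     return ret
-- ===== SOURCE B (Python) =====
-- def _generate_accom_scroll(sv):
--     if not sv:
--         return [(0, 0)]
--     times = [t for t, _ in sv]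
--     vels = [v for _, v in sv]
--     segs = [(t1 - t0) * v for (t0, t1), v in zip(zip(times, times[1:]), vels)]
--     integrals = [0]
--     for s in segs:
--         integrals.append(integrals[-1] + s)
--     return list(zip(times, integrals))
-- ===== Notes on version B (the rewrite author's own statement) =====
-- stated objective: alternative
-- what changed: Replaces A's single incremental loop that reads back ret[i] and sv[i] by index with a precompute-then-prefix-sum decomposition: extract times and velocities, build per-segment contributions via zips, prefix-sum them, and zip times with the integrals.
import Mathlib
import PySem

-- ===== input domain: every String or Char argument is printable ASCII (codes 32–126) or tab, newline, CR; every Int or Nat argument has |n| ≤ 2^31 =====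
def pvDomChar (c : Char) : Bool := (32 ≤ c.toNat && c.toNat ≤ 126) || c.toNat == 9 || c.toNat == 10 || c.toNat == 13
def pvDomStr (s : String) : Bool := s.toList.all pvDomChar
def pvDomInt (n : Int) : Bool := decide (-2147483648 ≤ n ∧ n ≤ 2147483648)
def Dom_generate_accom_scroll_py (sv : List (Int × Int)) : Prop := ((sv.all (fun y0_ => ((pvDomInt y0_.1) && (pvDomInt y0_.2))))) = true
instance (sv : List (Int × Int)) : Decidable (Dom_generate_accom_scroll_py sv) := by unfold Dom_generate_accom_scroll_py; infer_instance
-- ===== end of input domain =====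

-- ===== PORT A =====
-- Literal port of A: start list, then a fold over enumerate(sv[1:]) reading ret[i] and sv[i]
-- (those indices are always in range in Python; pyGetD's default is never used).
def generate_accom_scroll_py (sv : List (Int × Int)) : List (Int × Int) :=
  let ret : List (Int × Int) :=
    if sv.length > 0 then [((PySem.List.pyGetD sv 0 (0, 0)).1, 0)] else [(0, 0)]
  (PySem.List.enumerate (PySem.List.slice sv (some 1) none)).foldl
    (fun ret p =>
      let i := p.1
      let t := p.2.1
      let integral :=
        (t - (PySem.List.pyGetD ret i (0, 0)).1) * (PySem.List.pyGetD sv i (0, 0)).2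
          + (PySem.List.pyGetD ret i (0, 0)).2
      ret ++ [(t, integral)])
    ret

-- ===== PORT B =====
-- Literal port of B: times/vels comprehensions, per-segment contributions via zips,
-- a prefix-sum loop using integrals[-1], and a final zip.
def generate_accom_scroll_py_alt (sv : List (Int × Int)) : List (Int × Int) :=
  if sv = [] then [(0, 0)]
  else
    let times := sv.map (fun p => p.1)
    let vels := sv.map (fun p => p.2)
    let segs := ((times.zip (PySem.List.slice times (some 1) none)).zip vels).map
      (fun p => (p.1.2 - p.1.1) * p.2)
    let integrals := segs.foldl
      (fun acc s => acc ++ [PySem.List.pyGetD acc (-1) 0 + s]) [(0 : Int)]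
    times.zip integrals

-- ===== PRECONDITION & SPEC =====
def Spec_generate_accom_scroll_py (sv : List (Int × Int)) (out : List (Int × Int)) : Prop := out = generate_accom_scroll_py_alt sv
instance (sv : List (Int × Int)) (out : List (Int × Int)) : Decidable (Spec_generate_accom_scroll_py sv out) := by unfold Spec_generate_accom_scroll_py; infer_instance

-- ===== CLAIM (what is proved, stated in full; the proofs are below) =====
def Claim_equal_generate_accom_scroll_py : Prop := ∀ (sv : List (Int × Int)), Dom_generate_accom_scroll_py sv → Spec_generate_accom_scroll_py sv (generate_accom_scroll_py sv)

-- ===== LEMMAS AND PROOFS =====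

-- Common characterisation of the tail of the result, given previous time t,
-- previous velocity v and accumulated integral acc.
def pvGo (t v acc : Int) : List (Int × Int) → List (Int × Int)
  | [] => []
  | (t', v') :: rest => (t', (t' - t) * v + acc) :: pvGo t' v' ((t' - t) * v + acc) rest

-- integrals[-1] on a list of the form acc ++ [x]
theorem pvLast (acc : List Int) (x : Int) :
    PySem.List.pyGetD (acc ++ [x]) (-1) 0 = x :=
  PySem.List.pyGetD_neg_one_append_singleton acc x 0

-- B's prefix-sum loop is scanl
theorem pvFoldlScan (segs : List Int) : ∀ (acc : List Int) (x : Int),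
    segs.foldl (fun acc s => acc ++ [PySem.List.pyGetD acc (-1) 0 + s]) (acc ++ [x])
      = acc ++ List.scanl (· + ·) x segs := by
  induction segs with
  | nil => intro acc x; simp [List.scanl]
  | cons s ss ih =>
      intro acc x
      simp only [List.foldl_cons, pvLast, List.scanl_cons]
      rw [ih (acc ++ [x]) (x + s)]
      simp

theorem pvFoldlScan0 (segs : List Int) :
    segs.foldl (fun acc s => acc ++ [PySem.List.pyGetD acc (-1) 0 + s]) [(0 : Int)]
      = List.scanl (· + ·) 0 segs := by
  simpa using pvFoldlScan segs [] 0

-- B's core (zip of times with the prefix sums of the segments) equals pvGo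
theorem pvBcore (rest : List (Int × Int)) : ∀ (t v acc : Int),
    (t :: rest.map (fun p => p.1)).zip
      (List.scanl (· + ·) acc
        ((((t :: rest.map (fun p => p.1)).zip (rest.map (fun p => p.1))).zip
            (v :: rest.map (fun p => p.2))).map (fun p => (p.1.2 - p.1.1) * p.2)))
      = (t, acc) :: pvGo t v acc rest := by
  induction rest with
  | nil => intro t v acc; simp [List.scanl, pvGo]
  | cons hd tl ih =>
      intro t v acc
      obtain ⟨t1, v1⟩ := hd
      simp only [List.map_cons, List.zip_cons_cons, List.scanl_cons]
      rw [show acc + (t1 - t) * v = (t1 - t) * v + acc from by ring, ih t1 v1 ((t1 - t) * v + acc)]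
      simp [pvGo]

-- A's loop: invariant induction over the remaining points, with enumerate offset k,
-- ret of length k + 1 ending in (tp, acc), and sv[k] = previous velocity v.
theorem pvAloop (rest : List (Int × Int)) : ∀ (sv ret : List (Int × Int)) (k : Nat)
    (tp v acc : Int),
    ret.length = k + 1 →
    ret.getLast? = some (tp, acc) →
    (PySem.List.pyGetD sv (k : Int) (0, 0)).2 = v →
    sv.drop (k + 1) = rest →
    (PySem.List.enumerate rest (k : Int)).foldl
      (fun ret p =>
        let i := p.1
        let t := p.2.1
        let integral :=
          (t - (PySem.List.pyGetD ret i (0, 0)).1) * (PySem.List.pyGetD sv i (0, 0)).2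
            + (PySem.List.pyGetD ret i (0, 0)).2
        ret ++ [(t, integral)]) ret
      = ret ++ pvGo tp v acc rest := by
  induction rest with
  | nil => intro sv ret k tp v acc h1 h2 h3 h4; simp [pvGo]
  | cons hd tl ih =>
      intro sv ret k tp v acc h1 h2 h3 h4
      obtain ⟨t1, v1⟩ := hd
      have hret : PySem.List.pyGetD ret (k : Int) (0, 0) = (tp, acc) := by
        have h2' : ret[k]? = some (tp, acc) := by
          rw [List.getLast?_eq_getElem?, h1] at h2
          simpa using h2
        rw [PySem.List.pyGetD_natCast, List.getD_eq_getElem?_getD, h2']; rfl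
      have hcast : ((k : Int) + 1) = (((k + 1 : Nat)) : Int) := by push_cast; ring
      have hsv1 : (PySem.List.pyGetD sv (((k + 1 : Nat)) : Int) (0, 0)).2 = v1 := by
        have hget : sv[k + 1]? = some (t1, v1) := by
          have := congrArg (fun l => l.head?) h4
          simpa [List.head?_drop] using this
        rw [PySem.List.pyGetD_natCast, List.getD_eq_getElem?_getD, hget]; rfl
      have hdrop2 : sv.drop ((k + 1) + 1) = tl := by
        have := congrArg List.tail h4
        simpa [List.tail_drop] using this
      simp only [PySem.List.enumerate_cons, List.foldl_cons, hret, h3]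
      rw [hcast]
      rw [ih sv (ret ++ [(t1, (t1 - tp) * v + acc)]) (k + 1) t1 v1
        ((t1 - tp) * v + acc) (by simp [h1]) (by simp) hsv1 hdrop2]
      simp [pvGo]

-- ===== VERDICT (by name: the statement is the Claim_ definition above) =====
theorem generate_accom_scroll_py_spec : Claim_equal_generate_accom_scroll_py := by
  intro sv _
  unfold Spec_generate_accom_scroll_py generate_accom_scroll_py generate_accom_scroll_py_alt
  cases sv with
  | nil => simp [PySem.List.slice]
  | cons hd tl =>
      obtain ⟨t0, v0⟩ := hd
      simp only [List.length_cons]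
      rw [if_pos (by omega : tl.length + 1 > 0),
          if_neg (by simp : ¬((t0, v0) :: tl) = []),
          PySem.List.slice_from_one, PySem.List.slice_from_one]
      simp only [List.tail_cons, List.map_cons]
      have hA := pvAloop tl ((t0, v0) :: tl)
        [((PySem.List.pyGetD ((t0, v0) :: tl) 0 (0, 0)).1, 0)] 0 t0 v0 0
        (by simp) (by simp [PySem.List.pyGetD_zero_cons])
        (by simp [PySem.List.pyGetD_zero_cons]) (by simp)
      simp only [Nat.cast_zero] at hA
      rw [hA, pvFoldlScan0, pvBcore tl t0 v0 0]
      simp [PySem.List.pyGetD_zero_cons]
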